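-- pv_equiv track=rewrite | github.com/Tahsin21/SearchEngines | SearchEngine.py | contiguousRun
-- ===== SOURCE A (Python) =====
-- def contiguousRun(tokenizedSentence, queryTokens):
--     longestRun = 0
--     currentRun = 0
--     for word in tokenizedSentence:
--         if word in queryTokens:
--             currentRun += 1
--             longestRun = max(longestRun, currentRun)
--         else:
--             currentRun = 0
--     return longestRun
-- ===== SOURCE B (Python) =====
-- def contiguousRun(tokenizedSentence, queryTokens):
--     best = 0
--     i = 0
--     n = len(tokenizedSentence)
--     while i < n:
--         if tokenizedSentence[i] in queryTokens:
--             j = i + 1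
--             while j < n and tokenizedSentence[j] in queryTokens:
--                 j += 1
--             if j - i > best:
--                 best = j - i
--             i = j
--         else:
--             i += 1
--     return best
-- ===== Notes on version B (the rewrite author's own statement) =====
-- stated objective: alternative
-- what changed: B scans by maximal runs: on hitting a matching word it advances an inner index to the end of that run and compares the whole run length against the best, instead of A's per-word running counter reset to zero on misses.
import Mathlib
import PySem

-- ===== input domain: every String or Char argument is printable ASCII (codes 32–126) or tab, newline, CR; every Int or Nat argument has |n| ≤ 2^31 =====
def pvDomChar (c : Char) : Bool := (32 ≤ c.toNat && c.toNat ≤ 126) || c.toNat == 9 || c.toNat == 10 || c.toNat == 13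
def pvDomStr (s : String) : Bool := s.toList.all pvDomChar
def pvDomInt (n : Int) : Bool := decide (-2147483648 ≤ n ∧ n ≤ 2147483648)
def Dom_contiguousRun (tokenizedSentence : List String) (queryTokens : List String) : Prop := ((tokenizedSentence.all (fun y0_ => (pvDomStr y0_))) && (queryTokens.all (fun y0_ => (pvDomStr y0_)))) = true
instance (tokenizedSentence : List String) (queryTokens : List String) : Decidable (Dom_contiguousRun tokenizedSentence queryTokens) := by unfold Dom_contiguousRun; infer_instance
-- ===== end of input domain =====

-- B replaces A's running-counter-with-reset by a run-at-a-time scan (measure each maximal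
-- matching run, keep the max); alternative decomposition, same asymptotic cost.

-- ===== PORT A =====
-- A: one pass keeping (longestRun, currentRun), resetting currentRun on a miss.
def contiguousRun (tokenizedSentence : List String) (queryTokens : List String) : Int :=
  (tokenizedSentence.foldl
    (fun (p : Int × Int) word =>
      if word ∈ queryTokens then (max p.1 (p.2 + 1), p.2 + 1) else (p.1, 0))
    (0, 0)).1

-- ===== PORT B =====
-- B: scan by maximal runs — at a matching word, measure the whole run (takeWhile),
-- compare against the best, and resume after the run (dropWhile).
def altGo (queryTokens : List String) : Nat → List String → Int
  | _, [] => 0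
  | 0, _ :: _ => 0            -- fuel (totality device only; never reached when fuel = length)
  | n + 1, w :: rest =>
    if w ∈ queryTokens then
      max (1 + ((rest.takeWhile (fun x => decide (x ∈ queryTokens))).length : Int))
          (altGo queryTokens n (rest.dropWhile (fun x => decide (x ∈ queryTokens))))
    else
      altGo queryTokens n rest

def contiguousRun_alt (tokenizedSentence : List String) (queryTokens : List String) : Int :=
  altGo queryTokens tokenizedSentence.length tokenizedSentence

-- ===== PRECONDITION & SPEC =====
def Spec_contiguousRun (tokenizedSentence : List String) (queryTokens : List String) (out : Int) : Prop := out = contiguousRun_alt tokenizedSentence queryTokens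
instance (tokenizedSentence : List String) (queryTokens : List String) (out : Int) : Decidable (Spec_contiguousRun tokenizedSentence queryTokens out) := by unfold Spec_contiguousRun; infer_instance

-- ===== CLAIM (what is proved, stated in full; the proofs are below) =====
def Claim_equal_contiguousRun : Prop := ∀ (tokenizedSentence : List String) (queryTokens : List String), Dom_contiguousRun tokenizedSentence queryTokens → Spec_contiguousRun tokenizedSentence queryTokens (contiguousRun tokenizedSentence queryTokens)

-- ===== LEMMAS AND PROOFS =====
-- best xs c: the final longestRun of A's loop started with currentRun = c and longestRun ≥ everything so far absorbed.
def best (queryTokens : List String) : List String → Int → Int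
  | [], c => c
  | w :: rest, c =>
    if w ∈ queryTokens then best queryTokens rest (c + 1)
    else max c (best queryTokens rest 0)

theorem best_ge (qt : List String) (xs : List String) (c : Int) : c ≤ best qt xs c := by
  induction xs generalizing c with
  | nil => simp [best]
  | cons w rest ih =>
    simp only [best]
    split
    · exact le_trans (by omega) (ih (c + 1))
    · exact le_max_left _ _
theorem best_nonneg (qt : List String) (xs : List String) : 0 ≤ best qt xs 0 := best_ge qt xs 0

theorem foldl_eq_best (qt : List String) (xs : List String) (L c : Int)
    (h : 0 ≤ c ∧ c ≤ L) :
    (xs.foldl (fun (p : Int × Int) word =>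
        if word ∈ qt then (max p.1 (p.2 + 1), p.2 + 1) else (p.1, 0)) (L, c)).1
      = max L (best qt xs c) := by
  induction xs generalizing L c with
  | nil => simp [best]; omega
  | cons w rest ih =>
    simp only [List.foldl_cons, best]
    split
    · rw [ih (max L (c + 1)) (c + 1) (by constructor <;> omega)]
      have := best_ge qt rest (c + 1)
      omega
    · rw [ih L 0 (by omega)]
      have := best_nonneg qt rest
      omega

theorem best_run (qt : List String) (xs : List String) (c : Int) (hc : 0 ≤ c) :
    best qt xs c
      = max (c + ((xs.takeWhile (fun x => decide (x ∈ qt))).length : Int))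
            (best qt (xs.dropWhile (fun x => decide (x ∈ qt))) 0) := by
  induction xs generalizing c with
  | nil => simp [best]; omega
  | cons w rest ih =>
    by_cases h : w ∈ qt
    · simp only [best, if_pos h, List.takeWhile, List.dropWhile, decide_eq_true h]
      rw [ih (c + 1) (by omega)]
      simp only [List.length_cons]
      push_cast
      omega
    · simp only [best, if_neg h, List.takeWhile, List.dropWhile, decide_eq_false h,
        List.length_nil, Nat.cast_zero]
      have := best_nonneg qt rest
      omega

theorem best_eq_altGo (qt : List String) (n : Nat) (xs : List String) (hn : xs.length ≤ n) :
    best qt xs 0 = altGo qt n xs := by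
  induction n generalizing xs with
  | zero =>
    cases xs with
    | nil => simp [best, altGo]
    | cons w rest => simp at hn
  | succ n ih =>
    cases xs with
    | nil => simp [best, altGo]
    | cons w rest =>
      by_cases h : w ∈ qt
      · rw [altGo, if_pos h]
        simp only [best, if_pos h, zero_add]
        rw [best_run qt rest 1 (by omega),
          ih (rest.dropWhile (fun x => decide (x ∈ qt)))
            (le_trans (List.length_dropWhile_le _ _) (by simpa using Nat.le_of_succ_le_succ hn))]
      · rw [altGo, if_neg h]
        simp only [best, if_neg h]
        have := best_nonneg qt rest
        rw [ih rest (by simpa using Nat.le_of_succ_le_succ hn)] at *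
        omega

-- ===== VERDICT (by name: the statement is the Claim_ definition above) =====
theorem contiguousRun_spec : Claim_equal_contiguousRun := by
  intro ts qt _
  show contiguousRun ts qt = contiguousRun_alt ts qt
  unfold contiguousRun contiguousRun_alt
  have h0 := best_nonneg qt ts
  rw [best_eq_altGo qt ts.length ts le_rfl] at h0
  rw [foldl_eq_best qt ts 0 0 (by omega), best_eq_altGo qt ts.length ts le_rfl]
  omega
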